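-- pv_equiv track=rewrite | github.com/abuendia/airr-ml-kaggle | src/utils.py | _count_gapped_kmers_from_kmer
-- ===== SOURCE A (Python) =====
-- from collections import defaultdict, Counter
-- import itertools
--
-- def _count_gapped_kmers_from_kmer(kmer: str, gap_char: str = '_', n_gaps: int = 1) -> Counter:
--     """Generate gapped k-mers by replacing positions in a contiguous k-mer with a gap character.
--
--     This follows the common "gapped k-mer" / wildcard-position definition: for a contiguous
--     k-mer of length k, choose n_gaps positions and replace them with `gap_char`.
--     The resulting feature string has the same length k.
--     """
--     counts = Counter()
--     if not isinstance(kmer, str):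
--         return counts
--     k = len(kmer)
--     if k == 0:
--         return counts
--     if n_gaps <= 0:
--         return counts
--     if n_gaps >= k:
--         return counts
--     # Avoid accidentally colliding with standard amino acids.
--     if len(gap_char) != 1:
--         raise ValueError("gap_char must be a single character")
--
--     for positions in itertools.combinations(range(k), n_gaps):
--         chars = list(kmer)
--         for pos in positions:
--             chars[pos] = gap_char
--         counts[''.join(chars)] += 1
--     return counts
-- ===== SOURCE B (Python) =====
-- from collections import Counter
--
-- def _count_gapped_kmers_from_kmer(kmer: str, gap_char: str = '_', n_gaps: int = 1) -> Counter:
--     """Recursive position-by-position enumeration of gapped k-mers."""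
--     counts = Counter()
--     if not isinstance(kmer, str):
--         return counts
--     k = len(kmer)
--     if k == 0:
--         return counts
--     if n_gaps <= 0:
--         return counts
--     if n_gaps >= k:
--         return counts
--     if len(gap_char) != 1:
--         raise ValueError("gap_char must be a single character")
--
--     def place(i, prefix, gaps_left):
--         if i == k:
--             if gaps_left == 0:
--                 counts[prefix] += 1
--             return
--         if gaps_left > 0:
--             place(i + 1, prefix + gap_char, gaps_left - 1)
--         place(i + 1, prefix + kmer[i], gaps_left)
--
--     place(0, '', n_gaps)
--     return counts
-- ===== Notes on version B (the rewrite author's own statement) =====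
-- stated objective: alternative
-- what changed: Replaced the itertools.combinations loop (materialise positions, copy the k-mer, overwrite chosen positions) with an accumulator-passing recursion that walks the k-mer position by position, carrying the built prefix and the remaining gap budget, branching gap-first so emission order matches combinations' lexicographic order.
-- outside the precondition, e.g. on _count_gapped_kmers_from_kmer('abc', 'xy', 1): A raises ValueError, B raises ValueError
import Mathlib
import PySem

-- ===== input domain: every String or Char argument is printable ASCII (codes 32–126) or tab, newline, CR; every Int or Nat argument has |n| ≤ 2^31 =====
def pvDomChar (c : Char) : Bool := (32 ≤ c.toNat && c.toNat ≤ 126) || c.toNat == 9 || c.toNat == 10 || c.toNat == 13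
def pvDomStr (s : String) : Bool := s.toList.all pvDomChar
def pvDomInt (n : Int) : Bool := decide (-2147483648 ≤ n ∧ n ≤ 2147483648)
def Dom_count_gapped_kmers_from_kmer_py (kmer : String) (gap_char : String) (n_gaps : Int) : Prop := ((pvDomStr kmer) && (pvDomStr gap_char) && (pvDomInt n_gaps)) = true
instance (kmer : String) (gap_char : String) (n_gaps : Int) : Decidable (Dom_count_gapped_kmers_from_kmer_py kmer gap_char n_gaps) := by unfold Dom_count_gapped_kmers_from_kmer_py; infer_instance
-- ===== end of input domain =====

-- B replaces A's itertools.combinations loop by an accumulator-passing recursion over positions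
-- carrying the built prefix and the remaining gap budget (objective: alternative decomposition).

-- ===== PORT A =====
-- itertools.combinations(range k, g) in lexicographic order, as the list of chosen position lists
def pvCombos : Nat → List Nat → List (List Nat)
  | 0, _ => [[]]
  | _ + 1, [] => []
  | g + 1, x :: xs => (pvCombos g xs).map (x :: ·) ++ pvCombos (g + 1) xs
  termination_by g xs => (g, xs)

def count_gapped_kmers_from_kmer_py (kmer : String) (gap_char : String) (n_gaps : Int) : List (String × Int) :=
  let counts : PySem.Dict String Int := PySem.Dict.empty
  let k : Int := (kmer.toList.length : Int)
  if k = 0 then counts.items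
  else if n_gaps ≤ 0 then counts.items
  else if k ≤ n_gaps then counts.items
  else
    match gap_char.toList with
    | [g] =>
      ((pvCombos n_gaps.toNat (List.range kmer.toList.length)).foldl
        (fun d ps =>
          let chars := ps.foldl (fun cs p => cs.set p g) kmer.toList
          d.modify (String.mk chars) 0 (· + 1)) counts).items
    | _ => counts.items   -- Python raises ValueError here; excluded by Pre_

-- ===== PORT B =====
-- place(i, prefix, gaps_left): walk the remaining characters, branching gap-first
def pvPlace (gap : Char) : List Char → List Char → Int → PySem.Dict String Int → PySem.Dict String Int
  | [], pref, gl, d => if gl = 0 then d.modify (String.mk pref) 0 (· + 1) else d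
  | c :: rest, pref, gl, d =>
      let d' := if 0 < gl then pvPlace gap rest (pref ++ [gap]) (gl - 1) d else d
      pvPlace gap rest (pref ++ [c]) gl d'

def count_gapped_kmers_from_kmer_py_alt (kmer : String) (gap_char : String) (n_gaps : Int) : List (String × Int) :=
  let counts : PySem.Dict String Int := PySem.Dict.empty
  let k : Int := (kmer.toList.length : Int)
  if k = 0 then counts.items
  else if n_gaps ≤ 0 then counts.items
  else if k ≤ n_gaps then counts.items
  else
    match gap_char.toList with
    | [g] => (pvPlace g kmer.toList [] n_gaps counts).items
    | [] => counts.items        -- Python raises ValueError here; excluded by Pre_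
    | _ :: _ :: _ => counts.items

-- ===== PRECONDITION & SPEC =====
-- Pre_ excludes exactly the inputs where Python A raises ValueError: all guards pass
-- (non-empty kmer, 0 < n_gaps < len(kmer)) but gap_char is not a single character.
def Pre_count_gapped_kmers_from_kmer_py (kmer : String) (gap_char : String) (n_gaps : Int) : Prop :=
  (kmer.toList.length = 0 ∨ n_gaps ≤ 0 ∨ (kmer.toList.length : Int) ≤ n_gaps) ∨ gap_char.toList.length = 1
instance (kmer : String) (gap_char : String) (n_gaps : Int) : Decidable (Pre_count_gapped_kmers_from_kmer_py kmer gap_char n_gaps) := by unfold Pre_count_gapped_kmers_from_kmer_py; infer_instance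

def pvWitness_count_gapped_kmers_from_kmer_py : String × String × Int := ("abc", "_", 1)

def Spec_count_gapped_kmers_from_kmer_py (kmer : String) (gap_char : String) (n_gaps : Int) (out : List (String × Int)) : Prop := out = count_gapped_kmers_from_kmer_py_alt kmer gap_char n_gaps
instance (kmer : String) (gap_char : String) (n_gaps : Int) (out : List (String × Int)) : Decidable (Spec_count_gapped_kmers_from_kmer_py kmer gap_char n_gaps out) := by unfold Spec_count_gapped_kmers_from_kmer_py; infer_instance

-- ===== CLAIM (what is proved, stated in full; the proofs are below) =====
def Claim_equal_count_gapped_kmers_from_kmer_py : Prop := ∀ (kmer : String) (gap_char : String) (n_gaps : Int), Dom_count_gapped_kmers_from_kmer_py kmer gap_char n_gaps → Pre_count_gapped_kmers_from_kmer_py kmer gap_char n_gaps → Spec_count_gapped_kmers_from_kmer_py kmer gap_char n_gaps (count_gapped_kmers_from_kmer_py kmer gap_char n_gaps)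

-- ===== LEMMAS AND PROOFS =====

lemma pvCombos_map (f : Nat → Nat) : ∀ (l : List Nat) (g : Nat),
    pvCombos g (l.map f) = (pvCombos g l).map (List.map f)
  | [], 0 => by simp [pvCombos]
  | [], _ + 1 => by simp [pvCombos]
  | x :: xs, 0 => by simp [pvCombos]
  | x :: xs, g + 1 => by
      simp only [List.map_cons, pvCombos, pvCombos_map f xs g, pvCombos_map f xs (g + 1),
        List.map_append, List.map_map]
      rfl

lemma foldl_set_shift (g : Char) : ∀ (ps : List Nat) (c : Char) (cs : List Char),
    (ps.map (· + 1)).foldl (fun acc p => acc.set p g) (c :: cs)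
      = c :: ps.foldl (fun acc p => acc.set p g) cs
  | [], _, _ => rfl
  | p :: ps, c, cs => by
      simp only [List.map_cons, List.foldl_cons, List.set_cons_succ]
      exact foldl_set_shift g ps c (cs.set p g)

lemma foldl_set_shift' (g : Char) : ∀ (ps : List Nat) (c : Char) (cs : List Char),
    ps.foldl (fun acc p => acc.set (p + 1) g) (c :: cs)
      = c :: ps.foldl (fun acc p => acc.set p g) cs
  | [], _, _ => rfl
  | p :: ps, c, cs => by
      simp only [List.foldl_cons, List.set_cons_succ]
      exact foldl_set_shift' g ps c (cs.set p g)

lemma pvPlace_eq (gap : Char) : ∀ (rest : List Char) (pref : List Char) (gl : Int)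
    (_ : 0 ≤ gl) (d : PySem.Dict String Int),
    pvPlace gap rest pref gl d
      = (pvCombos gl.toNat (List.range rest.length)).foldl
          (fun d ps =>
            d.modify (String.mk (pref ++ ps.foldl (fun cs p => cs.set p gap) rest)) 0 (· + 1)) d
  | [], pref, gl, hgl, d => by
      by_cases h : gl = 0
      · subst h; simp [pvPlace, pvCombos]
      · obtain ⟨m, hm⟩ : ∃ m, gl.toNat = m + 1 := ⟨gl.toNat - 1, by omega⟩
        simp [pvPlace, h, hm, pvCombos]
  | c :: rest, pref, gl, hgl, d => by
      have step : pvPlace gap (c :: rest) pref gl d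
          = pvPlace gap rest (pref ++ [c]) gl
              (if 0 < gl then pvPlace gap rest (pref ++ [gap]) (gl - 1) d else d) := rfl
      by_cases h : gl = 0
      · subst h
        rw [step, if_neg (lt_irrefl (0 : Int)),
          pvPlace_eq gap rest (pref ++ [c]) 0 le_rfl d]
        simp [pvCombos]
      · have h0 : 0 < gl := lt_of_le_of_ne hgl (Ne.symm h)
        obtain ⟨m, hm⟩ : ∃ m, gl.toNat = m + 1 := ⟨gl.toNat - 1, by omega⟩
        have hm' : (gl - 1).toNat = m := by omega
        have hmap : (List.range rest.length).map Nat.succ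
            = (List.range rest.length).map (· + 1) := by
          simp
        rw [step, if_pos h0,
          pvPlace_eq gap rest (pref ++ [c]) gl hgl _,
          pvPlace_eq gap rest (pref ++ [gap]) (gl - 1) (by omega) d,
          hm, hm', List.length_cons, List.range_succ_eq_map, hmap,
          pvCombos, pvCombos_map, pvCombos_map, List.foldl_append]
        simp only [List.foldl_map]
        congr 1
        · funext d' ps
          simp [List.foldl_cons, List.set_cons_zero, List.set_cons_succ,
            foldl_set_shift, foldl_set_shift', List.append_assoc]
        · congr 1
          funext d' ps
          simp [List.foldl_cons, List.set_cons_zero, List.set_cons_succ,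
            foldl_set_shift, foldl_set_shift', List.append_assoc]

-- ===== VERDICT (by name: the statement is the Claim_ definition above) =====
theorem count_gapped_kmers_from_kmer_py_spec : Claim_equal_count_gapped_kmers_from_kmer_py := by
  intro kmer gap_char n_gaps _ _
  unfold Spec_count_gapped_kmers_from_kmer_py
  unfold count_gapped_kmers_from_kmer_py count_gapped_kmers_from_kmer_py_alt
  dsimp only
  split_ifs with h1 h2 h3
  · rfl
  · rfl
  · rfl
  · cases hgc : gap_char.toList with
    | nil => rfl
    | cons a t =>
      cases t with
      | nil =>
        dsimp only
        rw [pvPlace_eq a kmer.toList [] n_gaps (by omega)]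
        simp only [List.nil_append]
      | cons b t' => rfl
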